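-- pv_equiv track=rewrite | github.com/finteger/KryptosK4 | Gromark.py | generate_key_base5
-- ===== SOURCE A (Python) =====
-- def generate_key_base5(primer, length):
--     """Generate a key sequence using only base 5 arithmetic (Berlin Clock hours)."""
--     key_queue = [int(ch) for ch in primer if ch.isdigit()]
--     if len(key_queue) < 2:
--         raise ValueError("Primer must contain at least two digits.")
--
--     key_stream = []
--     for _ in range(length):
--         key_stream.append(key_queue[0])
--         new_digit = (key_queue[0] + key_queue[1]) % 5
--         key_queue.pop(0)
--         key_queue.append(new_digit)
--
--     return key_stream
-- ===== SOURCE B (Python) =====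
-- def generate_key_base5(primer, length):
--     """Generate a key sequence using only base 5 arithmetic (Berlin Clock hours)."""
--     digits = [int(ch) for ch in primer if ch.isdigit()]
--     n = len(digits)
--     if n < 2:
--         raise ValueError("Primer must contain at least two digits.")
--     out = []
--     for i in range(length):
--         if i < n:
--             out.append(digits[i])
--         else:
--             out.append((out[i - n] + out[i - n + 1]) % 5)
--     return out
-- ===== Notes on version B (the rewrite author's own statement) =====
-- stated objective: alternative
-- what changed: Replaces the sliding queue with its per-step pop(0)/append by lag-indexing directly into the output list being built (out[i] = digits[i] for i<n, else (out[i-n]+out[i-n+1])%5), so no queue is maintained at all.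
import Mathlib
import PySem

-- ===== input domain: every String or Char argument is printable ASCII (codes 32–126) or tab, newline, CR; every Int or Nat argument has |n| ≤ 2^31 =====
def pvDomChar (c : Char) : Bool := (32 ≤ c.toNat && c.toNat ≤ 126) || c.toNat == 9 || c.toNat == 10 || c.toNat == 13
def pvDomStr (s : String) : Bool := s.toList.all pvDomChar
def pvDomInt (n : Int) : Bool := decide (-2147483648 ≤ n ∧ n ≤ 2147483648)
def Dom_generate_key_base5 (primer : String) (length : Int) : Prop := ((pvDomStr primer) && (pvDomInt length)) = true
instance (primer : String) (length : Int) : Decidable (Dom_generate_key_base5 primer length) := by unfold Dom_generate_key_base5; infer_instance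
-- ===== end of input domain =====

-- B replaces A's sliding queue (pop(0)/append each step) by lag-indexing into the output list
-- being built: out[i] = digits[i] for i < n, else (out[i-n] + out[i-n+1]) % 5.

-- ===== PORT A =====
-- int(ch) for a char with ch.isdigit() (ASCII domain) is its code minus 48; exact there.
-- for _ in range(length): stream.append(q[0]); new = (q[0]+q[1]) % 5; q.pop(0); q.append(new).
-- q[0]/q[1] are PySem.List.pyGetD (always in range: Pre_ keeps the queue at ≥ 2 elements).
def generate_key_base5 (primer : String) (length : Int) : List Int :=
  let key_queue := (primer.toList.filter PySem.Chars.isdigit).map (fun c => ((c.toNat : Int) - 48))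
  -- if len(key_queue) < 2 Python raises ValueError: excluded by Pre_
  ((PySem.List.pyRange 0 length 1).foldl
    (fun (s : List Int × List Int) _ =>
      let q := s.1
      let new_digit := PySem.Int.mod (PySem.List.pyGetD q 0 0 + PySem.List.pyGetD q 1 0) 5
      (q.drop 1 ++ [new_digit], s.2 ++ [PySem.List.pyGetD q 0 0]))
    (key_queue, [])).2

-- ===== PORT B =====
def generate_key_base5_alt (primer : String) (length : Int) : List Int :=
  let digits := (primer.toList.filter PySem.Chars.isdigit).map (fun c => ((c.toNat : Int) - 48))
  let n : Int := digits.length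
  -- if n < 2 raise ValueError: excluded by Pre_
  (PySem.List.pyRange 0 length 1).foldl
    (fun (out : List Int) i =>
      if i < n then out ++ [PySem.List.pyGetD digits i 0]
      else out ++ [PySem.Int.mod (PySem.List.pyGetD out (i - n) 0 + PySem.List.pyGetD out (i - n + 1) 0) 5])
    []

-- ===== PRECONDITION & SPEC =====
-- Pre_ excludes exactly the primers with fewer than two digit characters, on which A raises ValueError.
def Pre_generate_key_base5 (primer : String) (length : Int) : Prop :=
  2 ≤ (primer.toList.filter PySem.Chars.isdigit).length
instance (primer : String) (length : Int) : Decidable (Pre_generate_key_base5 primer length) := by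
  unfold Pre_generate_key_base5; infer_instance

def pvWitness_generate_key_base5 : String × Int := ("23", 5)

def Spec_generate_key_base5 (primer : String) (length : Int) (out : List Int) : Prop := out = generate_key_base5_alt primer length
instance (primer : String) (length : Int) (out : List Int) : Decidable (Spec_generate_key_base5 primer length out) := by unfold Spec_generate_key_base5; infer_instance

-- ===== CLAIM (what is proved, stated in full; the proofs are below) =====
def Claim_equal_generate_key_base5 : Prop := ∀ (primer : String) (length : Int), Dom_generate_key_base5 primer length → Pre_generate_key_base5 primer length → Spec_generate_key_base5 primer length (generate_key_base5 primer length)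

-- ===== LEMMAS AND PROOFS =====

-- the key stream as a function of the position: s i = digits[i] for i < n, else (s(i-n)+s(i-n+1)) % 5
def pvS (ds : List Int) (i : Nat) : Int :=
  if _h : i < ds.length then ds.getD i 0
  else if _h2 : 2 ≤ ds.length then
    PySem.Int.mod (pvS ds (i - ds.length) + pvS ds (i - ds.length + 1)) 5
  else 0
termination_by i
decreasing_by all_goals omega

theorem pvS_lt (ds : List Int) (i : Nat) (h : i < ds.length) : pvS ds i = ds.getD i 0 := by
  rw [pvS]; simp [h]

theorem pvS_ge (ds : List Int) (i : Nat) (h : ds.length ≤ i) (h2 : 2 ≤ ds.length) :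
    pvS ds i = PySem.Int.mod (pvS ds (i - ds.length) + pvS ds (i - ds.length + 1)) 5 := by
  rw [pvS]; simp [Nat.not_lt.mpr h, h2]

theorem pvS_init (ds : List Int) : (List.range' 0 ds.length).map (pvS ds) = ds := by
  apply List.ext_getElem
  · simp
  · intro k h1 h2
    simp only [List.getElem_map, List.getElem_range']
    rw [show 0 + 1 * k = k by omega, pvS_lt ds k h2]
    simp [List.getD_eq_getElem?_getD, List.getElem?_eq_getElem h2]

-- A's loop invariant: after m steps the queue holds s m .. s (m+n-1) and the stream s 0 .. s (m-1)
theorem pvA_inv (ds : List Int) (h2 : 2 ≤ ds.length) (m : Nat) :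
    ((PySem.List.pyRange 0 (m : Int) 1).foldl
      (fun (s : List Int × List Int) _ =>
        let q := s.1
        let new_digit := PySem.Int.mod (PySem.List.pyGetD q 0 0 + PySem.List.pyGetD q 1 0) 5
        (q.drop 1 ++ [new_digit], s.2 ++ [PySem.List.pyGetD q 0 0]))
      (ds, []))
    = ((List.range' m ds.length).map (pvS ds), (List.range' 0 m).map (pvS ds)) := by
  induction m with
  | zero =>
    simpa using congrArg (fun l => (l, ([] : List Int))) (pvS_init ds).symm
  | succ m ih =>
    have hcast : ((m + 1 : Nat) : Int) = (m : Int) + 1 := by push_cast; ring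
    rw [hcast, PySem.List.pyRange_one_succ_right (by positivity), List.foldl_append, ih]
    simp only [List.foldl_cons, List.foldl_nil]
    have hq : (List.range' m ds.length).map (pvS ds)
        = pvS ds m :: pvS ds (m + 1) :: (List.range' (m + 2) (ds.length - 2)).map (pvS ds) := by
      have : ds.length = (ds.length - 2) + 1 + 1 := by omega
      rw [this, List.range'_succ, List.range'_succ]
      simp
    rw [hq]
    have hget0 : PySem.List.pyGetD (pvS ds m :: pvS ds (m + 1) :: (List.range' (m + 2) (ds.length - 2)).map (pvS ds)) 0 0 = pvS ds m := by
      simpa using PySem.List.pyGetD_natCast (pvS ds m :: pvS ds (m + 1) :: (List.range' (m + 2) (ds.length - 2)).map (pvS ds)) 0 0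
    have hget1 : PySem.List.pyGetD (pvS ds m :: pvS ds (m + 1) :: (List.range' (m + 2) (ds.length - 2)).map (pvS ds)) 1 0 = pvS ds (m + 1) := by
      simpa using PySem.List.pyGetD_natCast (pvS ds m :: pvS ds (m + 1) :: (List.range' (m + 2) (ds.length - 2)).map (pvS ds)) 1 0
    rw [hget0, hget1, Prod.mk.injEq]
    refine ⟨?_, ?_⟩
    · -- queue: drop 1 ++ [new] = s (m+1) .. s (m+n)
      have hnew : pvS ds (m + ds.length) = PySem.Int.mod (pvS ds m + pvS ds (m + 1)) 5 := by
        rw [pvS_ge ds (m + ds.length) (by omega) h2, Nat.add_sub_cancel]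
      rw [List.drop_one, List.tail_cons, ← hnew]
      have h3 : ds.length = (ds.length - 2 + 1) + 1 := by omega
      conv_rhs => rw [h3, List.range'_concat, List.range'_succ]
      have hidx : m + 1 + 1 * (ds.length - 2 + 1) = m + ds.length := by omega
      rw [hidx]
      simp
    · -- stream: append s m
      rw [List.range'_concat]
      simp

-- B's loop invariant: after m steps the output is s 0 .. s (m-1)
theorem pvB_inv (ds : List Int) (h2 : 2 ≤ ds.length) (m : Nat) :
    ((PySem.List.pyRange 0 (m : Int) 1).foldl
      (fun (out : List Int) i =>
        if i < (ds.length : Int) then out ++ [PySem.List.pyGetD ds i 0]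
        else out ++ [PySem.Int.mod (PySem.List.pyGetD out (i - ds.length) 0 + PySem.List.pyGetD out (i - (ds.length : Int) + 1) 0) 5])
      [])
    = (List.range' 0 m).map (pvS ds) := by
  induction m with
  | zero => simp
  | succ m ih =>
    have hcast : ((m + 1 : Nat) : Int) = (m : Int) + 1 := by push_cast; ring
    rw [hcast, PySem.List.pyRange_one_succ_right (by positivity), List.foldl_append, ih]
    simp only [List.foldl_cons, List.foldl_nil]
    rw [List.range'_concat]
    by_cases hm : m < ds.length
    · rw [if_pos (by exact_mod_cast hm)]
      rw [PySem.List.pyGetD_natCast]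
      simp
      rw [pvS_lt ds m hm]
      simp [List.getD_eq_getElem?_getD]
    · rw [if_neg (by push_cast; omega)]
      have e1 : (m : Int) - ds.length = ((m - ds.length : Nat) : Int) := by omega
      rw [e1]
      have e2 : ((m - ds.length : Nat) : Int) + 1 = ((m - ds.length + 1 : Nat) : Int) := by omega
      rw [e2, PySem.List.pyGetD_natCast, PySem.List.pyGetD_natCast]
      have hg1 : ((List.range' 0 m).map (pvS ds)).getD (m - ds.length) 0 = pvS ds (m - ds.length) := by
        have hlt : m - ds.length < m := by omega
        rw [List.getD_eq_getElem?_getD, List.getElem?_eq_getElem (by simpa using hlt)]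
        simp
      have hg2 : ((List.range' 0 m).map (pvS ds)).getD (m - ds.length + 1) 0 = pvS ds (m - ds.length + 1) := by
        have hlt : m - ds.length + 1 < m := by omega
        rw [List.getD_eq_getElem?_getD, List.getElem?_eq_getElem (by simpa using hlt)]
        simp
      rw [hg1, hg2]
      simp [pvS_ge ds m (by omega) h2]

theorem pyRange_toNat (L : Int) : PySem.List.pyRange 0 L 1 = PySem.List.pyRange 0 (L.toNat : Int) 1 := by
  by_cases h : 0 ≤ L
  · rw [Int.toNat_of_nonneg h]
  · rw [PySem.List.pyRange_one_eq_nil (by omega), PySem.List.pyRange_one_eq_nil (by omega)]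

-- ===== VERDICT (by name: the statement is the Claim_ definition above) =====
theorem generate_key_base5_spec : Claim_equal_generate_key_base5 := by
  intro primer length _ hpre
  unfold Spec_generate_key_base5 generate_key_base5 generate_key_base5_alt
  have h2 : 2 ≤ ((primer.toList.filter PySem.Chars.isdigit).map (fun c => ((c.toNat : Int) - 48))).length := by
    unfold Pre_generate_key_base5 at hpre
    simpa using hpre
  simp only [pyRange_toNat length]
  rw [pvA_inv _ h2 length.toNat, pvB_inv _ h2 length.toNat]
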